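-- pv_equiv track=rewrite | github.com/Twangybeast/ARK-NLP-Problem | ErrorClassifier.py | generate_word_set
-- ===== SOURCE A (Python) =====
-- def generate_word_set(tokens):
--     s = set()
--     for t in tokens:
--         i = 0
--         while str(t) + str(i) in s:
--             i += 1
--         s.add(str(t) + str(i))
--     return s
-- ===== SOURCE B (Python) =====
-- def generate_word_set(tokens):
--     s = set()
--     nxt = {}
--     for t in tokens:
--         key = str(t)
--         p = nxt.get(key, 0)
--         # a free suffix always exists among the len(s)+1 candidates p..p+len(s)
--         i = next(k for k in range(p, p + len(s) + 1) if key + str(k) not in s)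
--         s.add(key + str(i))
--         nxt[key] = i + 1
--     return s
-- ===== Notes on version B (the rewrite author's own statement) =====
-- stated objective: faster
-- what changed: B keeps a dict of per-token resume pointers and picks the suffix with a single bounded search (next over range(p, p+len(s)+1)) starting at the saved pointer, instead of A's unbounded while loop restarting from 0 for every token, making duplicate-heavy inputs amortized near-linear instead of quadratic.
import Mathlib
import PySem

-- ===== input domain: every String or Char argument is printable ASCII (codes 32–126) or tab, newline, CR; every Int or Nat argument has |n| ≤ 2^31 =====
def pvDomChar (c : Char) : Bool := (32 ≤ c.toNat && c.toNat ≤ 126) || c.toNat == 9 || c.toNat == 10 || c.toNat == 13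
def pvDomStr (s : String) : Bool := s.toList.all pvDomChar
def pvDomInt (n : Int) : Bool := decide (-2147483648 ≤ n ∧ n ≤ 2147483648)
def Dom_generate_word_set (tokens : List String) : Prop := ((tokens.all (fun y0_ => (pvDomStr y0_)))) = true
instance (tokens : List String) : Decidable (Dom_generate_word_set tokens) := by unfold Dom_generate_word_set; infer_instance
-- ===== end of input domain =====

-- B replaces A's restart-from-0 unbounded while loop by a dict of resume pointers plus one bounded range search per token (faster on duplicate-heavy input).


-- ===== PORT A =====
-- the Python while loop `while t + str(i) in s: i += 1`; fuel (|s| + 1 at the call site)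
-- only bounds the recursion — the loop provably stops before the fuel runs out (pvLoop_exists below)
def pvLoop (s : List String) (t : String) : Nat → Int → Int
  | 0, i => i
  | fuel + 1, i => if (t ++ PySem.Int.toStr i) ∈ s then pvLoop s t fuel (i + 1) else i

def pvGoA : List String → List String → List String
  | [], s => s
  | t :: rest, s =>
      let i := pvLoop s t (s.length + 1) 0
      pvGoA rest (PySem.Set.add s (t ++ PySem.Int.toStr i))

def generate_word_set (tokens : List String) : List String := pvGoA tokens []

-- ===== PORT B =====
-- Python's `next(k for k in range(p, p + len(s) + 1) if key + str(k) not in s)`;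
-- the `.getD p` default is a dead branch: the range always contains a free index
-- (pvFind_isSome below), so the Python `next` never raises StopIteration
def generate_word_set_alt (tokens : List String) : List String :=
  (tokens.foldl
    (fun (st : List String × PySem.Dict String Int) t =>
      let p := st.2.getD t 0
      let i := (((PySem.List.pyRange p (p + st.1.length + 1) 1).find?
                  (fun k => !decide ((t ++ PySem.Int.toStr k) ∈ st.1))).getD p)
      (PySem.Set.add st.1 (t ++ PySem.Int.toStr i), st.2.insert t (i + 1)))
    ([], PySem.Dict.empty)).1

-- ===== PRECONDITION & SPEC =====
def Spec_generate_word_set (tokens : List String) (out : List String) : Prop := out = generate_word_set_alt tokens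
instance (tokens : List String) (out : List String) : Decidable (Spec_generate_word_set tokens out) := by unfold Spec_generate_word_set; infer_instance

-- ===== CLAIM (what is proved, stated in full; the proofs are below) =====
def Claim_equal_generate_word_set : Prop := ∀ (tokens : List String), Dom_generate_word_set tokens → Spec_generate_word_set tokens (generate_word_set tokens)

-- ===== LEMMAS AND PROOFS =====

lemma pvDigitChar_inj (m n : ℕ) (hm : m < 10) (hn : n < 10) (h : m.digitChar = n.digitChar) : m = n := by
  interval_cases m <;> interval_cases n <;> first | rfl | (exfalso; exact absurd h (by decide))

lemma pvToDigits10_inj : ∀ m n : ℕ, Nat.toDigits 10 m = Nat.toDigits 10 n → m = n := by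
  intro m
  induction m using Nat.strong_induction_on with
  | _ m ih =>
    intro n h
    rw [Nat.toDigits_eq_if (by norm_num)] at h
    rw [Nat.toDigits_eq_if (b := 10) (n := n) (by norm_num)] at h
    split_ifs at h with h1 h2 h2
    · exact pvDigitChar_inj _ _ h1 h2 (by simpa using h)
    · have hl := congrArg List.length h
      simp at hl
      exact absurd hl (by
        have := Nat.length_toDigits_pos (b := 10) (n := n / 10)
        intro hc; rw [hc] at this; simp at this)
    · have hl := congrArg List.length h
      simp at hl
      exact absurd hl (by
        have := Nat.length_toDigits_pos (b := 10) (n := m / 10)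
        intro hc; rw [hc] at this; simp at this)
    · rw [← List.concat_eq_append, ← List.concat_eq_append] at h
      obtain ⟨h3, h4⟩ := List.concat_inj.mp h
      have hdiv := ih (m / 10) (by omega) (n / 10) h3
      have hmod := pvDigitChar_inj (m % 10) (n % 10) (by omega) (by omega) h4
      omega

lemma pvToStr_inj {i j : Int} (hi : 0 ≤ i) (hj : 0 ≤ j)
    (h : PySem.Int.toStr i = PySem.Int.toStr j) : i = j := by
  unfold PySem.Int.toStr PySem.Int.toChars at h
  rw [if_neg (by omega), if_neg (by omega)] at h
  have h' : Nat.toDigits 10 i.toNat = Nat.toDigits 10 j.toNat := by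
    have := congrArg String.toList h
    simpa [String.toList_ofList] using this
  have := pvToDigits10_inj _ _ h'
  omega

lemma pvCand_inj (t : String) {i j : Int} (hi : 0 ≤ i) (hj : 0 ≤ j)
    (h : t ++ PySem.Int.toStr i = t ++ PySem.Int.toStr j) : i = j := by
  apply pvToStr_inj hi hj
  have := congrArg String.toList h
  rw [String.toList_append, String.toList_append] at this
  exact String.toList_inj.mp (List.append_cancel_left this)

-- among the q - p ≥ |s| + 1 distinct candidates of [p, q) at least one is not in s
lemma pvFree_exists (s : List String) (t : String) (p q : Int) (hp : 0 ≤ p)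
    (hq : p + s.length + 1 ≤ q) :
    ∃ k : Int, p ≤ k ∧ k < q ∧ (t ++ PySem.Int.toStr k) ∉ s := by
  by_contra hall
  push Not at hall
  set L := (List.range (s.length + 1)).map (fun k : Nat => t ++ PySem.Int.toStr (p + k)) with hL
  have hnodL : L.Nodup := by
    refine List.Nodup.map_on ?_ (List.nodup_range)
    intro a ha b hb hab
    have := pvCand_inj t (i := p + a) (j := p + b) (by omega) (by omega) hab
    omega
  have hsub : L ⊆ s := by
    intro x hx
    rw [hL, List.mem_map] at hx
    obtain ⟨k, hk, rfl⟩ := hx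
    have hk' := List.mem_range.mp hk
    exact hall (p + k) (by omega) (by omega)
  have hcard : L.length ≤ s.length := by
    have h1 : L.toFinset.card = L.length := List.toFinset_card_of_nodup hnodL
    have h2 : L.toFinset ⊆ s.toFinset := fun x hx =>
      List.mem_toFinset.mpr (hsub (List.mem_toFinset.mp hx))
    have h3 := Finset.card_le_card h2
    have h4 := List.toFinset_card_le s
    omega
  simp [hL] at hcard

-- characterisation of A's while loop, given that a free suffix exists within the fuel
lemma pvLoop_spec (s : List String) (t : String) : ∀ (fuel : Nat) (i : Int),
    (∃ k : Nat, k < fuel ∧ (t ++ PySem.Int.toStr (i + k)) ∉ s) →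
    (t ++ PySem.Int.toStr (pvLoop s t fuel i)) ∉ s ∧
    (∀ j : Int, i ≤ j → j < pvLoop s t fuel i → (t ++ PySem.Int.toStr j) ∈ s) ∧
    i ≤ pvLoop s t fuel i := by
  intro fuel
  induction fuel with
  | zero => intro i ⟨k, hk, _⟩; omega
  | succ fuel ihf =>
    intro i ⟨k, hk, hfree⟩
    by_cases hmem : (t ++ PySem.Int.toStr i) ∈ s
    · have hk0 : k ≠ 0 := by rintro rfl; simp at hfree; exact hfree hmem
      have hex : ∃ k' : Nat, k' < fuel ∧ (t ++ PySem.Int.toStr (i + 1 + k')) ∉ s := by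
        refine ⟨k - 1, by omega, ?_⟩
        have : i + 1 + ((k : Int) - 1) = i + k := by omega
        simpa [show ((k - 1 : Nat) : Int) = (k : Int) - 1 by omega, this] using hfree
      obtain ⟨h1, h2, h3⟩ := ihf (i + 1) hex
      rw [pvLoop, if_pos hmem]
      refine ⟨h1, ?_, by omega⟩
      intro j hj1 hj2
      rcases eq_or_lt_of_le hj1 with rfl | hlt
      · exact hmem
      · exact h2 j (by omega) hj2
    · rw [pvLoop, if_neg hmem]
      exact ⟨hmem, fun j h1 h2 => absurd (lt_of_le_of_lt h1 h2) (lt_irrefl _), le_refl _⟩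

lemma pvLoop_exists (s : List String) (t : String) (i : Int) (hi : 0 ≤ i) :
    ∃ k : Nat, k < s.length + 1 ∧ (t ++ PySem.Int.toStr (i + k)) ∉ s := by
  obtain ⟨k, hk1, hk2, hk3⟩ := pvFree_exists s t i (i + s.length + 1) hi (le_refl _)
  exact ⟨(k - i).toNat, by omega, by
    have : i + ((k - i).toNat : Int) = k := by omega
    rwa [this]⟩

-- characterisation of B's bounded find? over the range [p, q): it finds some r that is
-- free, with everything in [p, r) taken and p ≤ r (so the `.getD` default is never taken)
lemma pvFind_spec (s : List String) (t : String) (q : Int) : ∀ (p : Int),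
    (∃ k : Int, p ≤ k ∧ k < q ∧ (t ++ PySem.Int.toStr k) ∉ s) →
    ∃ r : Int,
      (PySem.List.pyRange p q 1).find?
          (fun k => !decide ((t ++ PySem.Int.toStr k) ∈ s)) = some r ∧
      (t ++ PySem.Int.toStr r) ∉ s ∧
      (∀ j : Int, p ≤ j → j < r → (t ++ PySem.Int.toStr j) ∈ s) ∧ p ≤ r := by
  intro p
  induction hfuel : (q - p).toNat generalizing p with
  | zero =>
    intro ⟨k, hk1, hk2, _⟩
    omega
  | succ fuel ihf =>
    intro ⟨k, hk1, hk2, hfree⟩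
    have hpq : p < q := by omega
    rw [PySem.List.pyRange_one_cons hpq]
    by_cases hmem : (t ++ PySem.Int.toStr p) ∈ s
    · rw [List.find?_cons_of_neg (by simp [hmem])]
      have hk1' : p + 1 ≤ k := by
        rcases eq_or_lt_of_le hk1 with rfl | h
        · exact absurd hmem hfree
        · omega
      obtain ⟨r, hfind, h1, h2, h3⟩ := ihf (p + 1) (by omega) ⟨k, hk1', hk2, hfree⟩
      refine ⟨r, hfind, h1, ?_, by omega⟩
      intro j hj1 hj2
      rcases eq_or_lt_of_le hj1 with rfl | hlt
      · exact hmem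
      · exact h2 j (by omega) hj2
    · rw [List.find?_cons_of_pos (by simp [hmem])]
      exact ⟨p, rfl, hmem,
        fun j h1 h2 => absurd (lt_of_le_of_lt h1 h2) (lt_irrefl _), le_refl _⟩

-- the set s together with the pointer dict d: every pointer is nonnegative and
-- every suffix strictly below it is already taken
def pvInv (s : List String) (d : PySem.Dict String Int) : Prop :=
  ∀ t : String, 0 ≤ d.getD t 0 ∧
    ∀ j : Int, 0 ≤ j → j < d.getD t 0 → (t ++ PySem.Int.toStr j) ∈ s

-- A's scan from 0 and B's bounded find from the saved pointer agree under the invariant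
lemma pvStep_eq (s : List String) (t : String) (d : PySem.Dict String Int)
    (hinv : pvInv s d) :
    pvLoop s t (s.length + 1) 0 =
      ((PySem.List.pyRange (d.getD t 0) (d.getD t 0 + s.length + 1) 1).find?
        (fun k => !decide ((t ++ PySem.Int.toStr k) ∈ s))).getD (d.getD t 0) := by
  obtain ⟨hp, hmem⟩ := hinv t
  obtain ⟨hA1, hA2, hA3⟩ := pvLoop_spec s t (s.length + 1) 0
    (by simpa using pvLoop_exists s t 0 (le_refl _))
  obtain ⟨rB, hfind, hB1, hB2, hB3⟩ := pvFind_spec s t (d.getD t 0 + s.length + 1)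
    (d.getD t 0)
    (pvFree_exists s t (d.getD t 0) (d.getD t 0 + s.length + 1) hp (le_refl _))
  rw [hfind, Option.getD_some]
  set rA := pvLoop s t (s.length + 1) 0
  rcases lt_trichotomy rA rB with hlt | heq | hgt
  · rcases lt_or_ge rA (d.getD t 0) with h | h
    · exact absurd (hmem rA hA3 h) hA1
    · exact absurd (hB2 rA h hlt) hA1
  · exact heq
  · exact absurd (hA2 rB (by omega) hgt) hB1

lemma pvMain : ∀ (tokens : List String) (s : List String) (d : PySem.Dict String Int),
    pvInv s d →
    pvGoA tokens s =
      (tokens.foldl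
        (fun (st : List String × PySem.Dict String Int) t =>
          let p := st.2.getD t 0
          let i := (((PySem.List.pyRange p (p + st.1.length + 1) 1).find?
                      (fun k => !decide ((t ++ PySem.Int.toStr k) ∈ st.1))).getD p)
          (PySem.Set.add st.1 (t ++ PySem.Int.toStr i), st.2.insert t (i + 1)))
        (s, d)).1 := by
  intro tokens
  induction tokens with
  | nil => intro s d _; rfl
  | cons t rest ih =>
    intro s d hinv
    rw [pvGoA, List.foldl_cons]
    simp only [← pvStep_eq s t d hinv]
    set r := pvLoop s t (s.length + 1) 0 with hr
    obtain ⟨hfree, hbelow, hnn⟩ := pvLoop_spec s t (s.length + 1) 0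
      (by simpa using pvLoop_exists s t 0 (le_refl _))
    apply ih
    intro t'
    rw [PySem.Dict.getD_insert]
    split_ifs with heq
    · subst heq
      refine ⟨by omega, fun j hj1 hj2 => ?_⟩
      rcases lt_or_ge j r with h | h
      · exact (PySem.Set.mem_add s _ _).mpr (Or.inl (hbelow j hj1 h))
      · have : j = r := by omega
        subst this
        exact (PySem.Set.mem_add s _ _).mpr (Or.inr rfl)
    · obtain ⟨h1, h2⟩ := hinv t'
      exact ⟨h1, fun j hj1 hj2 => (PySem.Set.mem_add s _ _).mpr (Or.inl (h2 j hj1 hj2))⟩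

-- ===== VERDICT (by name: the statement is the Claim_ definition above) =====
theorem generate_word_set_spec : Claim_equal_generate_word_set := by
  intro tokens _
  unfold Spec_generate_word_set generate_word_set generate_word_set_alt
  exact pvMain tokens [] PySem.Dict.empty (fun t => by simp [PySem.Dict.getD_empty])
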